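-- pv_equiv track=rewrite | github.com/LiamPalmqvist/TransferProject | SQLiteShow.py | getRev
-- ===== SOURCE A (Python) =====
-- def getRev(showList):  # This gets the revenue of the performances so I don't have to repeat it a lot later
--     revenue = 0
--     for i in range(len(showList)):
--         if showList[i][3] == 0:
--             revenue += 10
--         elif showList[i][3] == 1:
--             revenue += 5
--     return revenue
-- ===== SOURCE B (Python) =====
-- def getRev(showList):
--     # Divide and conquer: price a one-row list via a price table, split larger
--     # lists in half and add the revenues of the halves.
--     PRICES = {0: 10, 1: 5}
--     n = len(showList)
--     if n == 0:
--         return 0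
--     if n == 1:
--         return PRICES.get(showList[0][3], 0)
--     mid = n // 2
--     return getRev(showList[:mid]) + getRev(showList[mid:])
-- ===== Notes on version B (the rewrite author's own statement) =====
-- stated objective: alternative
-- what changed: Replaces the index-driven accumulation loop with a divide-and-conquer recursion: a one-row list is priced through a {type: price} table lookup, a larger list is split at the midpoint and the revenues of the two halves are added; correct because revenue is a sum and addition is associative.
import Mathlib
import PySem

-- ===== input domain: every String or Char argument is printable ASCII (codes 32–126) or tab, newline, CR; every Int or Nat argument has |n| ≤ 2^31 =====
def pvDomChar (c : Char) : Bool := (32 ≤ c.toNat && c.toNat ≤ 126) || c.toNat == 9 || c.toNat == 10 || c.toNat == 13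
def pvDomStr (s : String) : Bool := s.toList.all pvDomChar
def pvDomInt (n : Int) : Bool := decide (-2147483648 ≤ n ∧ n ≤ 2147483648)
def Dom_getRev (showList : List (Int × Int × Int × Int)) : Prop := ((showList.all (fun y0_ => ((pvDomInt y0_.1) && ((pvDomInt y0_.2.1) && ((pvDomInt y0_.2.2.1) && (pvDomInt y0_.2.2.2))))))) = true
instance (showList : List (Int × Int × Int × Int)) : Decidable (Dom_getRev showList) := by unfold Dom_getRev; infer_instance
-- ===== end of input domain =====

-- B replaces A's index-driven accumulation loop with a table-driven divide-and-conquer recursion (one row priced by a dict lookup, larger lists split at the midpoint and added); an alternative decomposition, not faster.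


-- ===== PORT A =====
-- Port of A: index loop over range(len(showList)), accumulating revenue per row.
def getRev (showList : List (Int × Int × Int × Int)) : Int :=
  (PySem.List.pyRange 0 showList.length 1).foldl
    (fun revenue i =>
      let row := PySem.List.pyGetD showList i (0, 0, 0, 0)
      if row.2.2.2 = 0 then revenue + 10
      else if row.2.2.2 = 1 then revenue + 5
      else revenue) 0

-- ===== PORT B =====
-- Source B's table PRICES = {0: 10, 1: 5}
def pvPrices : PySem.Dict Int Int := (PySem.Dict.empty.insert 0 10).insert 1 5

-- Port of B: divide and conquer; a one-row list is priced by the table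
-- (PRICES.get(showList[0][3], 0)), larger lists are split at mid = n // 2
-- and the revenues of the two halves are added.
def getRev_alt (showList : List (Int × Int × Int × Int)) : Int :=
  let n := showList.length
  if n = 0 then 0
  else if n = 1 then pvPrices.getD (PySem.List.pyGetD showList 0 (0, 0, 0, 0)).2.2.2 0
  else
    let mid : Int := PySem.Int.floordiv (n : Int) 2
    getRev_alt (PySem.List.slice showList none (some mid)) +
    getRev_alt (PySem.List.slice showList (some mid) none)
termination_by showList.length
decreasing_by
  all_goals rw [PySem.Int.floordiv_eq_ediv_of_pos (by norm_num)]
  · rw [PySem.List.slice_to (hb := by positivity)]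
    simp only [List.length_take]; omega
  · rw [PySem.List.slice_from (ha := by positivity)]
    simp only [List.length_drop]; omega

-- ===== PRECONDITION & SPEC =====
def Spec_getRev (showList : List (Int × Int × Int × Int)) (out : Int) : Prop := out = getRev_alt showList
instance (showList : List (Int × Int × Int × Int)) (out : Int) : Decidable (Spec_getRev showList out) := by unfold Spec_getRev; infer_instance

-- ===== CLAIM (what is proved, stated in full; the proofs are below) =====
def Claim_equal_getRev : Prop := ∀ (showList : List (Int × Int × Int × Int)), Dom_getRev showList → Spec_getRev showList (getRev showList)

-- ===== LEMMAS AND PROOFS =====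
-- The price of one row's type, written as an if-chain.
def pvPriceFn (t : Int) : Int := if t = 0 then 10 else if t = 1 then 5 else 0

theorem pvPrices_getD (t : Int) : pvPrices.getD t 0 = pvPriceFn t := by
  simp only [pvPrices, pvPriceFn, PySem.Dict.getD_insert, PySem.Dict.getD_empty]
  split_ifs <;> simp_all

-- B's divide and conquer computes the sum of the row prices (strong induction on length).
theorem alt_eq_sum_aux (n : ℕ) : ∀ l : List (Int × Int × Int × Int), l.length = n →
    getRev_alt l = (l.map (fun r => pvPriceFn r.2.2.2)).sum := by
  induction n using Nat.strong_induction_on with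
  | _ n ih =>
    intro l hl
    rw [getRev_alt]
    simp only []
    split_ifs with h0 h1
    · obtain rfl := List.length_eq_zero_iff.mp h0; simp
    · obtain ⟨r, rfl⟩ := List.length_eq_one_iff.mp h1
      simp [PySem.List.pyGetD_zero_cons, pvPrices_getD]
    · rw [PySem.Int.floordiv_eq_ediv_of_pos (by norm_num),
        PySem.List.slice_to (hb := by positivity), PySem.List.slice_from (ha := by positivity),
        ih _ (by simp [List.length_take]; omega) _ rfl,
        ih _ (by simp [List.length_drop]; omega) _ rfl,
        ← List.sum_append, ← List.map_append, List.take_append_drop]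

-- A's fold computes the same sum.
theorem getRev_fold (l : List (Int × Int × Int × Int)) (a : Int) :
    l.foldl (fun revenue row =>
      if row.2.2.2 = 0 then revenue + 10
      else if row.2.2.2 = 1 then revenue + 5
      else revenue) a
    = a + (l.map (fun r => pvPriceFn r.2.2.2)).sum := by
  induction l generalizing a with
  | nil => simp
  | cons r t ih =>
    simp only [List.foldl_cons, List.map_cons, List.sum_cons, ih, pvPriceFn]
    split_ifs <;> ring

-- ===== VERDICT (by name: the statement is the Claim_ definition above) =====
theorem getRev_spec : Claim_equal_getRev := by
  intro l _
  unfold Spec_getRev getRev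
  rw [PySem.List.foldl_pyRange_zero_pyGetD' l ((0:Int), (0:Int), (0:Int), (0:Int))
      (fun acc row => if row.2.2.2 = 0 then acc + 10
        else if row.2.2.2 = 1 then acc + 5 else acc) 0,
    getRev_fold, alt_eq_sum_aux l.length l rfl, zero_add]
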